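-- pv_equiv track=rewrite | github.com/Gitravail/binomial-random-walk | random_walk.py | _compute_values_2d
-- ===== SOURCE A (Python) =====
-- def _compute_values_2d(first: list, second: list):
--     values = {}
--     for i in range(len(first)):
--         key = (first[i], second[i])
--         if key in values:
--             values[key] += 1
--         else:
--             values[key] = 1
--     values = dict(sorted(values.items()))
--     return values
-- ===== SOURCE B (Python) =====
-- def _compute_values_2d(first: list, second: list):
--     # Sort the pairs once, then count each run in a single pass; the result
--     # dict is built already key-sorted, so no final sorted() is needed.
--     pairs = sorted([(first[i], second[i]) for i in range(len(first))])
--     runs = []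
--     for p in pairs:
--         if runs and runs[-1][0] == p:
--             runs[-1][1] += 1
--         else:
--             runs.append([p, 1])
--     return {key: n for key, n in runs}
-- ===== Notes on version B (the rewrite author's own statement) =====
-- stated objective: alternative
-- what changed: B replaces A's per-element counting dict plus final sorted() with a single sort of the (first[i], second[i]) pair list followed by one run-length pass that emits the counts already in key order.
import Mathlib
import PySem

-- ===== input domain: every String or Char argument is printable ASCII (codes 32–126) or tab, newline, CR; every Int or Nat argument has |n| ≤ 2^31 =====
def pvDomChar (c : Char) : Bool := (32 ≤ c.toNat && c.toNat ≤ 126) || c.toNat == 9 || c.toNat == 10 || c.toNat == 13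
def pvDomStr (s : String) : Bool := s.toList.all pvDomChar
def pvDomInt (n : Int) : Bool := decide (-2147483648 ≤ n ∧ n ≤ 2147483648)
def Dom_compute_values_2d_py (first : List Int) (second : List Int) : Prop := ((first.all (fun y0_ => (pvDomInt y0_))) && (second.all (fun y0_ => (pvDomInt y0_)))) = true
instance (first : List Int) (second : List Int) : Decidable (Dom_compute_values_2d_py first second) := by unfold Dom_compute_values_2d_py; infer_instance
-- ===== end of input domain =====

-- B replaces A's counting dict + final sorted() by sorting the pair list once and
-- run-length counting it in a single pass (objective: alternative, not faster).

-- ===== PORT A =====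
-- Python tuples compare lexicographically, so the sort key is toLex into Lex (Int × Int)
-- (the dict keys are distinct, so sorting the items by their key pair is Python's tuple sort).
-- first[i]/second[i] are ported with pyGetD; Pre_ guarantees every index is in range.
def compute_values_2d_py (first : List Int) (second : List Int) : List (Int × Int × Int) :=
  let values : PySem.Dict (Int × Int) Int :=
    (PySem.List.pyRange 0 (first.length : Int) 1).foldl
      (fun d i =>
        let key := (PySem.List.pyGetD first i 0, PySem.List.pyGetD second i 0)
        if d.contains key then d.insert key ((d.get? key).getD 0 + 1)
        else d.insert key 1)
      PySem.Dict.empty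
  (PySem.List.sorted values.items (fun p => (toLex p.1 : Lex (Int × Int)))).map
    (fun p => (p.1.1, p.1.2, p.2))


-- ===== PORT B =====
-- one run-length step of Source B's loop; the accumulator is Source B's `runs` REVERSED
-- (runs[-1] is the head), reversed back after the fold.
def cvAltStep (acc : List ((Int × Int) × Int)) (p : Int × Int) : List ((Int × Int) × Int) :=
  match acc with
  | (k, c) :: rest => if k = p then (k, c + 1) :: rest else (p, 1) :: (k, c) :: rest
  | [] => [(p, 1)]


def compute_values_2d_py_alt (first : List Int) (second : List Int) : List (Int × Int × Int) :=
  let pairs := PySem.List.sorted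
      ((PySem.List.pyRange 0 (first.length : Int) 1).map
        (fun i => (PySem.List.pyGetD first i 0, PySem.List.pyGetD second i 0)))
      (fun p => (toLex p : Lex (Int × Int)))
  let runs := pairs.foldl cvAltStep []
  runs.reverse.map (fun p => (p.1.1, p.1.2, p.2))


-- ===== PRECONDITION & SPEC =====
-- Pre_ excludes exactly the inputs on which Python A raises IndexError
-- (second shorter than first); B raises there too.
def Pre_compute_values_2d_py (first : List Int) (second : List Int) : Prop :=
  first.length ≤ second.length
instance (first : List Int) (second : List Int) : Decidable (Pre_compute_values_2d_py first second) := by unfold Pre_compute_values_2d_py; infer_instance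

def pvWitness_compute_values_2d_py : List Int × List Int := ([1, 2, 1, 0], [3, 4, 3, 5])

def Spec_compute_values_2d_py (first : List Int) (second : List Int) (out : List (Int × Int × Int)) : Prop := out = compute_values_2d_py_alt first second
instance (first : List Int) (second : List Int) (out : List (Int × Int × Int)) : Decidable (Spec_compute_values_2d_py first second out) := by unfold Spec_compute_values_2d_py; infer_instance

-- ===== CLAIM (what is proved, stated in full; the proofs are below) =====
def Claim_equal_compute_values_2d_py : Prop := ∀ (first : List Int) (second : List Int), Dom_compute_values_2d_py first second → Pre_compute_values_2d_py first second → Spec_compute_values_2d_py first second (compute_values_2d_py first second)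

-- ===== LEMMAS AND PROOFS =====

-- the Python set of a list (first occurrences, in order) is a sublist of it
theorem pv_ofList_sublist {α : Type} [BEq α] [LawfulBEq α] : ∀ (xs : List α), (PySem.Set.ofList xs).Sublist xs
  | [] => by simp
  | x :: xs => by
      rw [PySem.Set.ofList_cons]
      exact List.Sublist.cons₂ x (List.Sublist.trans (by simp [PySem.Set.discard]) (pv_ofList_sublist xs))


-- loop invariant of B's run-length pass: with the current run (k, c) on top of the
-- accumulator and every remaining element ≥ k, folding a sorted remainder S produces
-- the per-key counts of S (keys ≠ k first-occurrence-ordered, reversed) and k's run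
-- extended by count of k in S.
theorem cv_aux : ∀ (S : List (Int × Int)) (k : Int × Int) (c : Int) (acc : List ((Int × Int) × Int)),
    S.Pairwise (fun a b => (toLex a : Lex (Int × Int)) ≤ toLex b) →
    (∀ y ∈ S, (toLex k : Lex (Int × Int)) ≤ toLex y) →
    S.foldl cvAltStep ((k, c) :: acc) =
      (((PySem.Set.ofList S).discard k).map (fun j => (j, (List.count j S : Int)))).reverse
        ++ (k, c + (List.count k S : Int)) :: acc := by
  intro S
  induction S with
  | nil => intro k c acc _ _; simp [PySem.Set.discard]
  | cons x T ih =>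
    intro k c acc hp hb
    rcases List.pairwise_cons.mp hp with ⟨hxT, hpT⟩
    by_cases hkx : k = x
    · subst hkx
      have hfold : (k :: T).foldl cvAltStep ((k, c) :: acc) = T.foldl cvAltStep ((k, c + 1) :: acc) := by
        simp [cvAltStep]
      rw [hfold, ih k (c + 1) acc hpT hxT]
      have hset : (PySem.Set.ofList (k :: T)).discard k = (PySem.Set.ofList T).discard k := by
        rw [PySem.Set.ofList_cons]
        simp [PySem.Set.discard, List.filter_filter]
      rw [hset]
      have hmap : ((PySem.Set.ofList T).discard k).map (fun j => (j, (List.count j (k :: T) : Int)))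
          = ((PySem.Set.ofList T).discard k).map (fun j => (j, (List.count j T : Int))) := by
        apply List.map_congr_left
        intro j hj
        have hjk : j ≠ k := ((PySem.Set.mem_discard _ _ _).mp hj).2
        simp [List.count_cons, hjk.symm]
      rw [hmap]
      have hc : c + (List.count k (k :: T) : Int) = c + 1 + (List.count k T : Int) := by
        simp [List.count_cons]; ring
      rw [hc]
    · have hkltx : (toLex k : Lex (Int × Int)) < toLex x :=
        lt_of_le_of_ne (hb x (List.mem_cons_self)) (by simpa [toLex_inj] using hkx)
      have hknot : k ∉ x :: T := by
        intro hmem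
        rcases List.mem_cons.mp hmem with h | h
        · exact hkx h
        · exact absurd (hb k hmem) (not_le_of_gt (lt_of_lt_of_le hkltx (hxT k h)))
      have hfold : (x :: T).foldl cvAltStep ((k, c) :: acc) = T.foldl cvAltStep ((x, 1) :: (k, c) :: acc) := by
        simp [cvAltStep, hkx]
      rw [hfold, ih x 1 ((k, c) :: acc) hpT hxT]
      have hcnt0 : List.count k (x :: T) = 0 := List.count_eq_zero_of_not_mem hknot
      have hset : (PySem.Set.ofList (x :: T)).discard k = x :: (PySem.Set.ofList T).discard x := by
        rw [PySem.Set.ofList_cons]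
        show List.filter _ _ = _
        rw [List.filter_cons]
        have hxk : (!(x == k)) = true := by simp [Ne.symm hkx]
        simp only [hxk, if_pos]
        congr 1
        apply List.filter_eq_self.mpr
        intro j hj
        have : j ∈ T := by
          have := ((PySem.Set.mem_discard _ _ _).mp hj).1
          exact (PySem.Set.mem_ofList _ _).mp this
        have : j ≠ k := fun h => hknot (by simp [← h, this])
        simp [this]
      rw [hset]
      have hmap : ((PySem.Set.ofList T).discard x).map (fun j => (j, (List.count j (x :: T) : Int)))
          = ((PySem.Set.ofList T).discard x).map (fun j => (j, (List.count j T : Int))) := by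
        apply List.map_congr_left
        intro j hj
        have hjx : j ≠ x := ((PySem.Set.mem_discard _ _ _).mp hj).2
        simp [List.count_cons, hjx.symm]
      have hcx : (List.count x (x :: T) : Int) = 1 + (List.count x T : Int) := by
        simp [List.count_cons]; ring
      simp [hmap, hcnt0, hcx]
      omega


-- B's whole run-length pass on a sorted list yields the per-key counts, reversed
theorem cv_runs (S : List (Int × Int))
    (hp : S.Pairwise (fun a b => (toLex a : Lex (Int × Int)) ≤ toLex b)) :
    S.foldl cvAltStep [] =
      ((PySem.Set.ofList S).map (fun j => (j, (List.count j S : Int)))).reverse := by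
  cases S with
  | nil => simp
  | cons x T =>
    rcases List.pairwise_cons.mp hp with ⟨hxT, hpT⟩
    have hfold : (x :: T).foldl cvAltStep [] = T.foldl cvAltStep [(x, 1)] := by
      simp [cvAltStep]
    rw [hfold, cv_aux T x 1 [] hpT hxT]
    rw [PySem.Set.ofList_cons]
    have hmap : ((PySem.Set.ofList T).discard x).map (fun j => (j, (List.count j (x :: T) : Int)))
        = ((PySem.Set.ofList T).discard x).map (fun j => (j, (List.count j T : Int))) := by
      apply List.map_congr_left
      intro j hj
      have hjx : j ≠ x := ((PySem.Set.mem_discard _ _ _).mp hj).2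
      simp [hjx.symm]
    simp [hmap]
    omega


-- the two ports agree on EVERY input (the proof does not need Dom_ or Pre_; Pre_ marks
-- where the Pythons return at all)
theorem cv_main (first second : List Int) :
    compute_values_2d_py first second = compute_values_2d_py_alt first second := by
  simp only [compute_values_2d_py, compute_values_2d_py_alt]
  set L : List (Int × Int) :=
    (PySem.List.pyRange 0 (first.length : Int) 1).map
      (fun i => (PySem.List.pyGetD first i 0, PySem.List.pyGetD second i 0)) with hL
  set S : List (Int × Int) := PySem.List.sorted L (fun p => (toLex p : Lex (Int × Int))) with hS
  have hSperm : S.Perm L := PySem.List.sorted_perm L _ false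
  have hSsorted : S.Pairwise (fun a b => (toLex a : Lex (Int × Int)) ≤ toLex b) :=
    PySem.List.sorted_pairwise L _
  -- A's dict-building loop is Counter(L)
  have hstep : L.foldl
      (fun (d : PySem.Dict (Int × Int) Int) p =>
        if d.contains p then d.insert p ((d.get? p).getD 0 + 1) else d.insert p 1)
      PySem.Dict.empty = PySem.Dict.counter L := by
    rw [PySem.List.foldl_congr_mem _ _
      (fun (d : PySem.Dict (Int × Int) Int) p => d.insert p (d.getD p 0 + 1)) _ ?_]
    · exact PySem.Dict.foldl_insert_getD_add_one_eq_counter L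
    · intro d p _
      by_cases hc : d.contains p
      · simp only [hc, if_pos, PySem.Dict.getD]
      · have hn : d.get? p = none := (PySem.Dict.get?_eq_none_iff_contains d p).mpr (by simpa using hc)
        simp [hc, PySem.Dict.getD, hn]
  have hdict : (PySem.List.pyRange 0 (first.length : Int) 1).foldl
      (fun (d : PySem.Dict (Int × Int) Int) i =>
        if d.contains (PySem.List.pyGetD first i 0, PySem.List.pyGetD second i 0) then
          d.insert (PySem.List.pyGetD first i 0, PySem.List.pyGetD second i 0)
            ((d.get? (PySem.List.pyGetD first i 0, PySem.List.pyGetD second i 0)).getD 0 + 1)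
        else d.insert (PySem.List.pyGetD first i 0, PySem.List.pyGetD second i 0) 1)
      PySem.Dict.empty = PySem.Dict.counter L := by
    refine Eq.trans ?_ hstep
    rw [hL]
    exact (List.foldl_map
      (f := fun i => (PySem.List.pyGetD first i 0, PySem.List.pyGetD second i 0))
      (g := fun (d : PySem.Dict (Int × Int) Int) p =>
        if d.contains p then d.insert p ((d.get? p).getD 0 + 1) else d.insert p 1)).symm
  rw [hdict, PySem.Dict.items_counter]
  rw [cv_runs S hSsorted, List.reverse_reverse]
  have hsorteq :
      PySem.List.sorted ((PySem.Set.ofList L).map (fun k => (k, (List.count k L : Int))))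
        (fun p => (toLex p.1 : Lex (Int × Int)))
      = (PySem.Set.ofList S).map (fun j => (j, (List.count j S : Int))) := by
    apply PySem.List.sorted_eq_of_perm_of_pairwise_lt
    · have hcount : (PySem.Set.ofList S).map (fun j => (j, (List.count j S : Int)))
          = (PySem.Set.ofList S).map (fun j => (j, (List.count j L : Int))) := by
        apply List.map_congr_left
        intro j _
        simp [hSperm.count_eq j]
      rw [hcount]
      apply List.Perm.map
      exact (List.perm_ext_iff_of_nodup (PySem.Set.nodup_ofList _) (PySem.Set.nodup_ofList _)).mpr
        (by intro a; simp [PySem.Set.mem_ofList, hSperm.mem_iff])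
    · rw [List.pairwise_map]
      have h1 : (PySem.Set.ofList S).Pairwise (fun a b => (toLex a : Lex (Int × Int)) ≤ toLex b) :=
        List.Pairwise.sublist (pv_ofList_sublist S) hSsorted
      have h2 : (PySem.Set.ofList S).Pairwise (fun a b => a ≠ b) := PySem.Set.nodup_ofList S
      exact (h1.and h2).imp (fun {a b} h =>
        lt_of_le_of_ne h.1 (fun he => h.2 (toLex_inj.mp he)))
  rw [hsorteq]

-- ===== VERDICT (by name: the statement is the Claim_ definition above) =====
theorem compute_values_2d_py_spec : Claim_equal_compute_values_2d_py := by
  intro first second _ _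
  exact cv_main first second
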